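-- pv_equiv track=rewrite | github.com/alexanderfranca/clarityai-challenge | src/core/ingest.py | _apply_normalize
-- ===== SOURCE A (Python) =====
-- from typing import (
--         Dict,
--         Any,
--         List,
--         Iterable,
--         Iterator,
-- )
--
-- def _apply_normalize(v, normalizers_to_execute: Iterable[str]):
--     """
--     Normalize the values, for example:
--     - trim strings
--     - collapse white spaces
--     - convert to lower case
--     """
--     if v is None:
--         return None
--
--     out = str(v)
--     for op in normalizers_to_execute or []:
--         normalizer = op.lower()
--         if normalizer == "strip":
--             out = out.strip()
--         elif normalizer == "collapse_ws":
--             out = " ".join(out.split())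
--         elif normalizer == "lower":
--             out = out.lower()
--     return out
-- ===== SOURCE B (Python) =====
-- def _apply_normalize(v, normalizers_to_execute):
--     """
--     Normalize by reducing the whole op sequence to a summary first:
--     collapse_ws absorbs strip (its output has no leading/trailing whitespace,
--     and stripping first cannot change the words), and lower commutes with both
--     whitespace ops, so the pipeline equals at most one whitespace pass
--     (collapse_ws if present, else strip if present) plus at most one lower pass.
--     """
--     if v is None:
--         return None
--     ops = [op.lower() for op in (normalizers_to_execute or [])]
--     out = str(v)
--     if "collapse_ws" in ops:
--         out = " ".join(out.split())
--     elif "strip" in ops: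
--         out = out.strip()
--     if "lower" in ops:
--         out = out.lower()
--     return out
-- ===== Notes on version B (the rewrite author's own statement) =====
-- stated objective: alternative
-- what changed: Instead of folding each normalizer over the string in sequence, B reduces the op list to a summary (collapse_ws absorbs strip, lower commutes with both) and applies at most one whitespace pass and one lower pass, regardless of how many ops are listed.
import Mathlib
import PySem

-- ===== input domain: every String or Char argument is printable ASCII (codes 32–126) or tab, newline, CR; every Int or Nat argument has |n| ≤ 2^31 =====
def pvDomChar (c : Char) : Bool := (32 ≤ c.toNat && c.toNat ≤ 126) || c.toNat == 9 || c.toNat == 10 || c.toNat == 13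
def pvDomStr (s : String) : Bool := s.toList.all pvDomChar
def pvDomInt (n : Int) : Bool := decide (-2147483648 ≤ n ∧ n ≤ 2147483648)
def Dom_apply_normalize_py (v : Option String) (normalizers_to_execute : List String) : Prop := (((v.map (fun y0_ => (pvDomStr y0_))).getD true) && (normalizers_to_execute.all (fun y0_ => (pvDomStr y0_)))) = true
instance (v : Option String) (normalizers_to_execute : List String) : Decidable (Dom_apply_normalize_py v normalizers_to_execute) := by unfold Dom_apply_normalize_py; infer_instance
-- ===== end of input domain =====

-- B replaces A's per-op fold over the string by a one-pass summary of the op list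
-- (collapse_ws absorbs strip, lower commutes with both), then applies at most one
-- whitespace pass and one lower pass — an alternative algorithm, same values.

-- ===== PORT A =====
-- loop body of A's for-loop: normalizer := op.lower(), then the if/elif chain
def pvStepA (out : String) (op : String) : String :=
  let normalizer := PySem.Str.lower op
  if normalizer = "strip" then PySem.Str.strip out
  else if normalizer = "collapse_ws" then PySem.Str.join " " (PySem.Str.split₀ out)
  else if normalizer = "lower" then PySem.Str.lower out
  else out

def apply_normalize_py (v : Option String) (normalizers_to_execute : List String) : Option String :=
  match v with
  | none => none
  | some s => some (normalizers_to_execute.foldl pvStepA s)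

-- ===== PORT B =====
-- B: lowercase the op names once, then apply the summarized pipeline:
-- collapse_ws if requested (it absorbs strip), else strip if requested; then lower if requested.
def apply_normalize_py_alt (v : Option String) (normalizers_to_execute : List String) : Option String :=
  match v with
  | none => none
  | some s =>
    let ops := normalizers_to_execute.map PySem.Str.lower
    let out := s
    let out := if ops.contains "collapse_ws" then PySem.Str.join " " (PySem.Str.split₀ out)
               else if ops.contains "strip" then PySem.Str.strip out
               else out
    let out := if ops.contains "lower" then PySem.Str.lower out else out
    some out

-- ===== PRECONDITION & SPEC =====
def Spec_apply_normalize_py (v : Option String) (normalizers_to_execute : List String) (out : Option String) : Prop := out = apply_normalize_py_alt v normalizers_to_execute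
instance (v : Option String) (normalizers_to_execute : List String) (out : Option String) : Decidable (Spec_apply_normalize_py v normalizers_to_execute out) := by unfold Spec_apply_normalize_py; infer_instance

-- ===== CLAIM (what is proved, stated in full; the proofs are below) =====
def Claim_equal_apply_normalize_py : Prop := ∀ (v : Option String) (normalizers_to_execute : List String), Dom_apply_normalize_py v normalizers_to_execute → Spec_apply_normalize_py v normalizers_to_execute (apply_normalize_py v normalizers_to_execute)

-- ===== LEMMAS AND PROOFS =====

-- ---- characters ----
theorem pv_toNat_ofNat_small (n : Nat) (h : n < 55296) : (Char.ofNat n).toNat = n := by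
  have hv : n.isValidChar := Or.inl h
  simp [Char.ofNat, hv, Char.toNat, Char.ofNatAux]

theorem pv_upper_bounds (c : Char) (h : PySem.Chars.isupper c = true) : 65 ≤ c.toNat ∧ c.toNat ≤ 90 := by
  simp [PySem.Chars.isupper, Char.le_def, UInt32.le_iff_toNat_le] at h
  exact h

theorem pv_isspace_false (c : Char) (h1 : 33 ≤ c.toNat) (h2 : c.toNat ≤ 126) : PySem.Chars.isspace c = false := by
  simp [PySem.Chars.isspace]
  omega

theorem pv_isupper_false (c : Char) (h : 97 ≤ c.toNat) : PySem.Chars.isupper c = false := by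
  simp [PySem.Chars.isupper, Char.le_def, UInt32.le_iff_toNat_le]
  omega

theorem pv_isspace_lowerChar (c : Char) : PySem.Chars.isspace (PySem.Chars.lowerChar c) = PySem.Chars.isspace c := by
  unfold PySem.Chars.lowerChar
  by_cases h : PySem.Chars.isupper c = true
  · have hb := pv_upper_bounds c h
    have ht : (Char.ofNat (c.toNat + 32)).toNat = c.toNat + 32 := pv_toNat_ofNat_small _ (by omega)
    rw [if_pos h, pv_isspace_false _ (by omega) (by omega), pv_isspace_false c (by omega) (by omega)]
  · simp [h]

theorem pv_lowerChar_idem (c : Char) : PySem.Chars.lowerChar (PySem.Chars.lowerChar c) = PySem.Chars.lowerChar c := by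
  unfold PySem.Chars.lowerChar
  by_cases h : PySem.Chars.isupper c = true
  · have hb := pv_upper_bounds c h
    have ht : (Char.ofNat (c.toNat + 32)).toNat = c.toNat + 32 := pv_toNat_ofNat_small _ (by omega)
    rw [if_pos h, if_neg (by rw [pv_isupper_false _ (by omega)]; simp)]
  · simp [h]

theorem pv_lowerChar_space : PySem.Chars.lowerChar ' ' = ' ' := by decide

theorem pv_isspace_comp_lowerChar : (PySem.Chars.isspace ∘ PySem.Chars.lowerChar) = PySem.Chars.isspace :=
  funext pv_isspace_lowerChar

-- ---- split₀.go unfolding equations ----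
theorem pv_go_eq_nil (cur : List Char) (acc : List (List Char)) :
    PySem.Chars.split₀.go [] cur acc = if cur.isEmpty then acc.reverse else (cur.reverse :: acc).reverse := by
  simp [PySem.Chars.split₀.go]

theorem pv_go_space (c : Char) (cs cur : List Char) (acc : List (List Char)) (h : PySem.Chars.isspace c = true) :
    PySem.Chars.split₀.go (c :: cs) cur acc =
      if cur.isEmpty then PySem.Chars.split₀.go cs [] acc else PySem.Chars.split₀.go cs [] (cur.reverse :: acc) := by
  simp [PySem.Chars.split₀.go, h]

theorem pv_go_nonspace (c : Char) (cs cur : List Char) (acc : List (List Char)) (h : PySem.Chars.isspace c = false) :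
    PySem.Chars.split₀.go (c :: cs) cur acc = PySem.Chars.split₀.go cs (c :: cur) acc := by
  simp [PySem.Chars.split₀.go, h]

-- ---- go / split₀ facts ----
theorem pv_go_allspace (t : List Char) (ht : ∀ c ∈ t, PySem.Chars.isspace c = true) (cur : List Char)
    (acc : List (List Char)) : PySem.Chars.split₀.go t cur acc = PySem.Chars.split₀.go [] cur acc := by
  induction t generalizing cur acc with
  | nil => rfl
  | cons c t ih =>
    rw [pv_go_space c t cur acc (ht c (by simp))]
    have ih' := fun cur acc => ih (fun c hc => ht c (by simp [hc])) cur acc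
    by_cases hcur : cur.isEmpty
    · rw [if_pos hcur, ih', pv_go_eq_nil, pv_go_eq_nil, if_pos hcur]
      simp
    · rw [if_neg hcur, ih', pv_go_eq_nil, pv_go_eq_nil, if_neg hcur]
      simp

theorem pv_go_append_allspace (xs t : List Char) (ht : ∀ c ∈ t, PySem.Chars.isspace c = true)
    (cur : List Char) (acc : List (List Char)) :
    PySem.Chars.split₀.go (xs ++ t) cur acc = PySem.Chars.split₀.go xs cur acc := by
  induction xs generalizing cur acc with
  | nil => simpa using pv_go_allspace t ht cur acc
  | cons c xs ih =>
    cases hsp : PySem.Chars.isspace c with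
    | true =>
      rw [List.cons_append, pv_go_space c _ cur acc hsp, pv_go_space c xs cur acc hsp]
      by_cases hcur : cur.isEmpty
      · rw [if_pos hcur, if_pos hcur, ih]
      · rw [if_neg hcur, if_neg hcur, ih]
    | false =>
      rw [List.cons_append, pv_go_nonspace c _ cur acc hsp, pv_go_nonspace c xs cur acc hsp, ih]

theorem pv_go_dropWhile (cs : List Char) (acc : List (List Char)) :
    PySem.Chars.split₀.go (cs.dropWhile PySem.Chars.isspace) [] acc = PySem.Chars.split₀.go cs [] acc := by
  induction cs with
  | nil => rfl
  | cons c cs ih =>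
    cases hsp : PySem.Chars.isspace c with
    | true =>
      rw [List.dropWhile_cons_of_pos (by simp [hsp]), ih, pv_go_space c cs [] acc hsp]
      simp
    | false =>
      rw [List.dropWhile_cons_of_neg (by simp [hsp])]

theorem pv_go_word (w : List Char) (hw : ∀ c ∈ w, PySem.Chars.isspace c = false) (cs cur : List Char)
    (acc : List (List Char)) :
    PySem.Chars.split₀.go (w ++ cs) cur acc = PySem.Chars.split₀.go cs (w.reverse ++ cur) acc := by
  induction w generalizing cur with
  | nil => simp
  | cons c w ih =>
    rw [List.cons_append, pv_go_nonspace c _ cur acc (hw c (by simp)),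
        ih (fun c hc => hw c (by simp [hc])) (c :: cur)]
    simp

theorem pv_go_good (cs cur : List Char) (acc : List (List Char))
    (ha : ∀ w ∈ acc, w ≠ [] ∧ ∀ c ∈ w, PySem.Chars.isspace c = false)
    (hc : ∀ c ∈ cur, PySem.Chars.isspace c = false) :
    ∀ w ∈ PySem.Chars.split₀.go cs cur acc, w ≠ [] ∧ ∀ c ∈ w, PySem.Chars.isspace c = false := by
  induction cs generalizing cur acc with
  | nil =>
    intro w hw
    rw [pv_go_eq_nil] at hw
    by_cases hcur : cur.isEmpty
    · rw [if_pos hcur, List.mem_reverse] at hw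
      exact ha w hw
    · rw [if_neg hcur, List.mem_reverse, List.mem_cons] at hw
      rcases hw with hw | hw
      · subst hw
        refine ⟨by simpa using (by simpa using hcur : cur ≠ []), ?_⟩
        intro c hcmem
        exact hc c (by simpa using hcmem)
      · exact ha w hw
  | cons c cs ih =>
    intro w hw
    cases hsp : PySem.Chars.isspace c with
    | true =>
      rw [pv_go_space c cs cur acc hsp] at hw
      by_cases hcur : cur.isEmpty
      · rw [if_pos hcur] at hw
        exact ih [] acc ha (by simp) w hw
      · rw [if_neg hcur] at hw
        refine ih [] (cur.reverse :: acc) ?_ (by simp) w hw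
        intro u hu
        rcases List.mem_cons.mp hu with hu | hu
        · subst hu
          refine ⟨by simpa using (by simpa using hcur : cur ≠ []), ?_⟩
          intro d hd
          exact hc d (by simpa using hd)
        · exact ha u hu
    | false =>
      rw [pv_go_nonspace c cs cur acc hsp] at hw
      refine ih (c :: cur) acc ha ?_ w hw
      intro d hd
      rcases List.mem_cons.mp hd with hd | hd
      · subst hd; exact hsp
      · exact hc d hd

theorem pv_split₀_good (cs : List Char) :
    ∀ w ∈ PySem.Chars.split₀ cs, w ≠ [] ∧ ∀ c ∈ w, PySem.Chars.isspace c = false :=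
  pv_go_good cs [] [] (by simp) (by simp)

theorem pv_go_join (ws : List (List Char))
    (h : ∀ w ∈ ws, w ≠ [] ∧ ∀ c ∈ w, PySem.Chars.isspace c = false) (acc : List (List Char)) :
    PySem.Chars.split₀.go (PySem.Chars.join [' '] ws) [] acc = acc.reverse ++ ws := by
  induction ws generalizing acc with
  | nil => rw [PySem.Chars.join_nil, pv_go_eq_nil]; simp
  | cons w ws ih =>
    cases ws with
    | nil =>
      rw [PySem.Chars.join_singleton]
      have hw := h w (by simp)
      calc PySem.Chars.split₀.go w [] acc
          = PySem.Chars.split₀.go (w ++ []) [] acc := by simp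
        _ = PySem.Chars.split₀.go [] (w.reverse ++ []) acc := pv_go_word w hw.2 [] [] acc
        _ = acc.reverse ++ [w] := by
            rw [pv_go_eq_nil, if_neg (by simpa using hw.1)]
            simp
    | cons w' ws' =>
      rw [PySem.Chars.join_cons_cons]
      have hw := h w (by simp)
      rw [show w ++ [' '] ++ PySem.Chars.join [' '] (w' :: ws')
            = w ++ (' ' :: PySem.Chars.join [' '] (w' :: ws')) by simp,
          pv_go_word w hw.2 _ [] acc, List.append_nil,
          pv_go_space _ _ _ _ (by decide), if_neg (by simpa using hw.1), List.reverse_reverse,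
          ih (fun u hu => h u (by simp [List.mem_cons] at hu ⊢; tauto)) (w :: acc)]
      simp

theorem pv_split₀_join (ws : List (List Char))
    (h : ∀ w ∈ ws, w ≠ [] ∧ ∀ c ∈ w, PySem.Chars.isspace c = false) :
    PySem.Chars.split₀ (PySem.Chars.join [' '] ws) = ws := by
  unfold PySem.Chars.split₀
  rw [pv_go_join ws h []]
  simp

theorem pv_split₀_lstrip (cs : List Char) :
    PySem.Chars.split₀ (PySem.Chars.lstrip cs) = PySem.Chars.split₀ cs := by
  unfold PySem.Chars.split₀ PySem.Chars.lstrip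
  exact pv_go_dropWhile cs []

theorem pv_split₀_rstrip (cs : List Char) :
    PySem.Chars.split₀ (PySem.Chars.rstrip cs) = PySem.Chars.split₀ cs := by
  have hdec : PySem.Chars.rstrip cs ++ (cs.reverse.takeWhile PySem.Chars.isspace).reverse = cs := by
    unfold PySem.Chars.rstrip
    rw [← List.reverse_append, List.takeWhile_append_dropWhile, List.reverse_reverse]
  have hsp : ∀ c ∈ (cs.reverse.takeWhile PySem.Chars.isspace).reverse, PySem.Chars.isspace c = true := by
    intro c hcmem
    exact List.mem_takeWhile_imp (List.mem_reverse.mp hcmem)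
  conv_rhs => rw [← hdec]
  unfold PySem.Chars.split₀
  exact (pv_go_append_allspace _ _ hsp [] []).symm

theorem pv_split₀_strip (cs : List Char) :
    PySem.Chars.split₀ (PySem.Chars.strip cs) = PySem.Chars.split₀ cs := by
  unfold PySem.Chars.strip
  rw [pv_split₀_rstrip, pv_split₀_lstrip]

-- ---- join facts ----
theorem pv_join_append_singleton (x : List Char) (xs : List (List Char)) (y : List Char) :
    PySem.Chars.join [' '] ((x :: xs) ++ [y]) = PySem.Chars.join [' '] (x :: xs) ++ ' ' :: y := by
  induction xs generalizing x with
  | nil => rw [List.cons_append, List.nil_append, PySem.Chars.join_cons_cons, PySem.Chars.join_singleton,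
               PySem.Chars.join_singleton]; simp
  | cons x' xs ih =>
    rw [List.cons_append, List.cons_append, PySem.Chars.join_cons_cons, ← List.cons_append, ih x',
        PySem.Chars.join_cons_cons]
    simp

theorem pv_reverse_join (ws : List (List Char)) :
    (PySem.Chars.join [' '] ws).reverse = PySem.Chars.join [' '] ((ws.map List.reverse).reverse) := by
  induction ws with
  | nil => simp [PySem.Chars.join_nil]
  | cons w ws ih =>
    cases ws with
    | nil => simp [PySem.Chars.join_singleton]
    | cons w' ws' =>
      rw [PySem.Chars.join_cons_cons, List.map_cons, List.reverse_cons]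
      cases hrev : ((w' :: ws').map List.reverse).reverse with
      | nil => simp at hrev
      | cons z zs =>
        rw [pv_join_append_singleton z zs w.reverse, ← hrev, ← ih]
        simp

theorem pv_lstrip_join (ws : List (List Char))
    (h : ∀ w ∈ ws, w ≠ [] ∧ ∀ c ∈ w, PySem.Chars.isspace c = false) :
    (PySem.Chars.join [' '] ws).dropWhile PySem.Chars.isspace = PySem.Chars.join [' '] ws := by
  cases ws with
  | nil => simp [PySem.Chars.join_nil]
  | cons w ws =>
    have hw := h w (by simp)
    cases hwshape : w with
    | nil => exact absurd hwshape hw.1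
    | cons a w' =>
      have ha : PySem.Chars.isspace a = false := hw.2 a (by simp [hwshape])
      cases ws with
      | nil =>
        rw [PySem.Chars.join_singleton, List.dropWhile_cons_of_neg (by simp [ha])]
      | cons w'' ws' =>
        rw [PySem.Chars.join_cons_cons]
        rw [show (a :: w') ++ [' '] ++ PySem.Chars.join [' '] (w'' :: ws')
              = a :: (w' ++ [' '] ++ PySem.Chars.join [' '] (w'' :: ws')) by simp]
        rw [List.dropWhile_cons_of_neg (by simp [ha])]

theorem pv_good_rev (ws : List (List Char))
    (h : ∀ w ∈ ws, w ≠ [] ∧ ∀ c ∈ w, PySem.Chars.isspace c = false) :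
    ∀ w ∈ (ws.map List.reverse).reverse, w ≠ [] ∧ ∀ c ∈ w, PySem.Chars.isspace c = false := by
  intro w hw
  rw [List.mem_reverse, List.mem_map] at hw
  obtain ⟨u, hu, rfl⟩ := hw
  obtain ⟨h1, h2⟩ := h u hu
  exact ⟨by simpa using h1, fun c hcmem => h2 c (List.mem_reverse.mp hcmem)⟩

theorem pv_strip_join (ws : List (List Char))
    (h : ∀ w ∈ ws, w ≠ [] ∧ ∀ c ∈ w, PySem.Chars.isspace c = false) :
    PySem.Chars.strip (PySem.Chars.join [' '] ws) = PySem.Chars.join [' '] ws := by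
  unfold PySem.Chars.strip PySem.Chars.lstrip PySem.Chars.rstrip
  rw [pv_lstrip_join ws h, pv_reverse_join ws, pv_lstrip_join _ (pv_good_rev ws h),
      ← pv_reverse_join ws, List.reverse_reverse]

-- ---- strip idempotence ----
theorem pv_head?_dropWhile (p : Char → Bool) (l : List Char) :
    ∀ c ∈ (l.dropWhile p).head?, p c = false := by
  intro c hcmem
  cases hd : l.dropWhile p with
  | nil => simp [hd] at hcmem
  | cons a tl =>
    rw [hd] at hcmem
    simp at hcmem
    subst hcmem
    have := List.head_dropWhile_not p (l := l) (by simp [hd])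
    simpa [hd] using this

theorem pv_dropWhile_eq_self_of_head (p : Char → Bool) (l : List Char)
    (h : ∀ c ∈ l.head?, p c = false) : l.dropWhile p = l := by
  cases l with
  | nil => rfl
  | cons a l => rw [List.dropWhile_cons_of_neg]; simp_all

theorem pv_strip_idem (cs : List Char) :
    PySem.Chars.strip (PySem.Chars.strip cs) = PySem.Chars.strip cs := by
  have hpref : PySem.Chars.rstrip (PySem.Chars.lstrip cs) <+: PySem.Chars.lstrip cs := by
    unfold PySem.Chars.rstrip
    have := List.dropWhile_suffix (l := (PySem.Chars.lstrip cs).reverse) PySem.Chars.isspace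
    have h2 := List.reverse_prefix.mpr this
    simpa using h2
  have hl : PySem.Chars.lstrip (PySem.Chars.rstrip (PySem.Chars.lstrip cs))
      = PySem.Chars.rstrip (PySem.Chars.lstrip cs) := by
    have hhead : ∀ c ∈ (PySem.Chars.rstrip (PySem.Chars.lstrip cs)).head?, PySem.Chars.isspace c = false := by
      intro c hcmem
      obtain ⟨t, ht⟩ := hpref
      cases hz : PySem.Chars.rstrip (PySem.Chars.lstrip cs) with
      | nil => rw [hz] at hcmem; simp at hcmem
      | cons a tl =>
        have hc : a = c := by rw [hz] at hcmem; simpa using hcmem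
        rw [← hc]
        have hy : (PySem.Chars.lstrip cs).head? = some a := by rw [← ht, hz]; simp
        exact pv_head?_dropWhile PySem.Chars.isspace cs a (Option.mem_def.mpr hy)
    exact pv_dropWhile_eq_self_of_head _ _ hhead
  have hr : PySem.Chars.rstrip (PySem.Chars.rstrip (PySem.Chars.lstrip cs))
      = PySem.Chars.rstrip (PySem.Chars.lstrip cs) := by
    unfold PySem.Chars.rstrip
    rw [List.reverse_reverse, List.dropWhile_idempotent]
  unfold PySem.Chars.strip
  rw [hl, hr]

-- ---- lower facts ----
theorem pv_go_lower (cs cur : List Char) (acc : List (List Char)) :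
    PySem.Chars.split₀.go (cs.map PySem.Chars.lowerChar) (cur.map PySem.Chars.lowerChar)
        (acc.map (List.map PySem.Chars.lowerChar))
      = (PySem.Chars.split₀.go cs cur acc).map (List.map PySem.Chars.lowerChar) := by
  induction cs generalizing cur acc with
  | nil =>
    rw [List.map_nil, pv_go_eq_nil, pv_go_eq_nil]
    by_cases hcur : cur.isEmpty
    · rw [if_pos (by simpa using hcur), if_pos hcur]
      simp
    · rw [if_neg (by simpa using hcur), if_neg hcur]
      simp [List.map_reverse]
  | cons c cs ih =>
    rw [List.map_cons]
    cases hsp : PySem.Chars.isspace c with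
    | true =>
      rw [pv_go_space _ _ _ _ (by rw [pv_isspace_lowerChar]; exact hsp), pv_go_space _ _ _ _ hsp]
      by_cases hcur : cur.isEmpty
      · rw [if_pos (by simpa using hcur), if_pos hcur]
        simpa using ih [] acc
      · rw [if_neg (by simpa using hcur), if_neg hcur]
        have := ih [] (cur.reverse :: acc)
        simpa [List.map_reverse] using this
    | false =>
      rw [pv_go_nonspace _ _ _ _ (by rw [pv_isspace_lowerChar]; exact hsp), pv_go_nonspace _ _ _ _ hsp]
      exact ih (c :: cur) acc

theorem pv_split₀_lower (cs : List Char) :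
    PySem.Chars.split₀ (PySem.Chars.lower cs) = (PySem.Chars.split₀ cs).map PySem.Chars.lower := by
  unfold PySem.Chars.split₀ PySem.Chars.lower
  simpa using pv_go_lower cs [] []

theorem pv_join_lower (ws : List (List Char)) :
    PySem.Chars.join [' '] (ws.map PySem.Chars.lower) = PySem.Chars.lower (PySem.Chars.join [' '] ws) := by
  induction ws with
  | nil => simp [PySem.Chars.join_nil, PySem.Chars.lower]
  | cons w ws ih =>
    cases ws with
    | nil => simp [PySem.Chars.join_singleton]
    | cons w' ws' =>
      rw [List.map_cons, List.map_cons, PySem.Chars.join_cons_cons, ← List.map_cons, ih,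
          PySem.Chars.join_cons_cons]
      unfold PySem.Chars.lower
      simp [pv_lowerChar_space]

theorem pv_lower_idem (cs : List Char) :
    PySem.Chars.lower (PySem.Chars.lower cs) = PySem.Chars.lower cs := by
  unfold PySem.Chars.lower
  rw [List.map_map]
  exact List.map_congr_left fun c _ => pv_lowerChar_idem c

theorem pv_strip_lower (cs : List Char) :
    PySem.Chars.strip (PySem.Chars.lower cs) = PySem.Chars.lower (PySem.Chars.strip cs) := by
  unfold PySem.Chars.strip PySem.Chars.lstrip PySem.Chars.rstrip PySem.Chars.lower
  rw [List.dropWhile_map, pv_isspace_comp_lowerChar, ← List.map_reverse, List.dropWhile_map,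
      pv_isspace_comp_lowerChar, ← List.map_reverse]

-- ---- string level: S = strip, C = collapse_ws, L = lower ----
theorem pv_toList_C (s : String) :
    (PySem.Str.join " " (PySem.Str.split₀ s)).toList
      = PySem.Chars.join [' '] (PySem.Chars.split₀ s.toList) := by
  rw [PySem.Str.toList_join, PySem.Str.split₀_map_toList]
  rfl

theorem pv_S_S (s : String) : PySem.Str.strip (PySem.Str.strip s) = PySem.Str.strip s :=
  String.toList_inj.mp (by simp [PySem.Str.toList_strip, pv_strip_idem])

theorem pv_C_S (s : String) :
    PySem.Str.join " " (PySem.Str.split₀ (PySem.Str.strip s)) = PySem.Str.join " " (PySem.Str.split₀ s) :=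
  String.toList_inj.mp (by simp [PySem.Str.toList_strip, pv_split₀_strip])

theorem pv_S_C (s : String) :
    PySem.Str.strip (PySem.Str.join " " (PySem.Str.split₀ s)) = PySem.Str.join " " (PySem.Str.split₀ s) :=
  String.toList_inj.mp (by
    rw [PySem.Str.toList_strip, pv_toList_C]
    exact pv_strip_join _ (pv_split₀_good s.toList))

theorem pv_C_C (s : String) :
    PySem.Str.join " " (PySem.Str.split₀ (PySem.Str.join " " (PySem.Str.split₀ s)))
      = PySem.Str.join " " (PySem.Str.split₀ s) :=
  String.toList_inj.mp (by
    simp [pv_split₀_join _ (pv_split₀_good s.toList)])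

theorem pv_L_L (s : String) : PySem.Str.lower (PySem.Str.lower s) = PySem.Str.lower s :=
  String.toList_inj.mp (by simp [PySem.Str.toList_lower, pv_lower_idem])

theorem pv_S_L (s : String) :
    PySem.Str.strip (PySem.Str.lower s) = PySem.Str.lower (PySem.Str.strip s) :=
  String.toList_inj.mp (by simp [PySem.Str.toList_strip, PySem.Str.toList_lower, pv_strip_lower])

theorem pv_C_L (s : String) :
    PySem.Str.join " " (PySem.Str.split₀ (PySem.Str.lower s))
      = PySem.Str.lower (PySem.Str.join " " (PySem.Str.split₀ s)) :=
  String.toList_inj.mp (by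
    simp [PySem.Str.toList_lower, pv_split₀_lower, pv_join_lower])

-- ---- the summarized pipeline and the fold ----
def pvApplySum (l : List String) (s : String) : String :=
  let out := if l.contains "collapse_ws" then PySem.Str.join " " (PySem.Str.split₀ s)
             else if l.contains "strip" then PySem.Str.strip s
             else s
  if l.contains "lower" then PySem.Str.lower out else out

theorem pv_foldl_eq (ops : List String) (s : String) :
    ops.foldl pvStepA s = pvApplySum (ops.map PySem.Str.lower) s := by
  induction ops generalizing s with
  | nil => rfl
  | cons op ops ih =>
    rw [List.foldl_cons, List.map_cons, ih (pvStepA s op)]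
    unfold pvStepA pvApplySum
    by_cases h1 : PySem.Str.lower op = "strip"
    · rw [h1]
      by_cases hC : ∃ a ∈ ops, PySem.Str.lower a = "collapse_ws"
      · simp [hC, pv_C_S]
      · by_cases hS : ∃ a ∈ ops, PySem.Str.lower a = "strip"
        · simp [hC, hS, pv_S_S]
        · simp [hC, hS]
    · by_cases h2 : PySem.Str.lower op = "collapse_ws"
      · rw [if_neg h1, h2]
        by_cases hC : ∃ a ∈ ops, PySem.Str.lower a = "collapse_ws"
        · simp [hC, pv_C_C]
        · by_cases hS : ∃ a ∈ ops, PySem.Str.lower a = "strip"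
          · simp [hC, hS, pv_S_C]
          · simp [hC, hS]
      · by_cases h3 : PySem.Str.lower op = "lower"
        · rw [if_neg h1, if_neg h2, h3]
          by_cases hC : ∃ a ∈ ops, PySem.Str.lower a = "collapse_ws"
          · by_cases hL : ∃ a ∈ ops, PySem.Str.lower a = "lower"
            · simp [hC, hL, pv_C_L, pv_L_L]
            · simp [hC, hL, pv_C_L]
          · by_cases hS : ∃ a ∈ ops, PySem.Str.lower a = "strip"
            · by_cases hL : ∃ a ∈ ops, PySem.Str.lower a = "lower"
              · simp [hC, hS, hL, pv_S_L, pv_L_L]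
              · simp [hC, hS, hL, pv_S_L]
            · by_cases hL : ∃ a ∈ ops, PySem.Str.lower a = "lower"
              · simp [hC, hS, hL, pv_L_L]
              · simp [hC, hS, hL]
        · rw [if_neg h1, if_neg h2, if_neg h3]
          simp [Ne.symm h1, Ne.symm h2, Ne.symm h3]

-- ===== VERDICT (by name: the statement is the Claim_ definition above) =====
theorem apply_normalize_py_spec : Claim_equal_apply_normalize_py := by
  intro v ops _
  unfold Spec_apply_normalize_py apply_normalize_py apply_normalize_py_alt
  cases v with
  | none => rfl
  | some s => exact congrArg some (pv_foldl_eq ops s)
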